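-- pv_equiv track=rewrite | github.com/ur-cristiano-fc/ur-cristiano-fc.github.io | scripts/pinterest_poster.py | parse_pin_variations
-- ===== SOURCE A (Python) =====
-- def parse_pin_variations(response_text):
--     """Parse Gemini's response into structured pin data"""
--
--     variations = []
--     current_pin = {}
--
--     lines = response_text.strip().split('\n')
--
--     for line in lines:
--         line = line.strip()
--
--         if line.startswith('PIN '):
--             if current_pin:
--                 variations.append(current_pin)
--             current_pin = {}
--
--         elif line.startswith('Description:'):
--             current_pin['description'] = line.replace('Description:', '').strip()
--
--         elif line.startswith('Hook:'):
--             current_pin['hook'] = line.replace('Hook:', '').strip()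
--
--         elif line.startswith('Hashtags:'):
--             hashtags = line.replace('Hashtags:', '').strip()
--             current_pin['hashtags'] = hashtags
--
--     # Add last pin
--     if current_pin:
--         variations.append(current_pin)
--
--     return variations
-- ===== SOURCE B (Python) =====
-- def parse_pin_variations(response_text):
--     """Segment-then-parse: split lines into PIN-delimited blocks, then parse each block."""
--     lines = [l.strip() for l in response_text.strip().split('\n')]
--
--     blocks = []
--     current = []
--     for line in lines:
--         if line.startswith('PIN '):
--             blocks.append(current)
--             current = []
--         else:
--             current.append(line)
--     blocks.append(current)
--
--     variations = []
--     for block in blocks: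
--         pin = {}
--         for line in block:
--             if line.startswith('Description:'):
--                 pin['description'] = line.replace('Description:', '').strip()
--             elif line.startswith('Hook:'):
--                 pin['hook'] = line.replace('Hook:', '').strip()
--             elif line.startswith('Hashtags:'):
--                 pin['hashtags'] = line.replace('Hashtags:', '').strip()
--         if pin:
--             variations.append(pin)
--     return variations
-- ===== Notes on version B (the rewrite author's own statement) =====
-- stated objective: alternative
-- what changed: Replaces A's single-pass state machine (current_pin threaded through one loop with a PIN branch) by a two-stage pipeline: first segment the stripped lines into PIN-delimited blocks (lines before the first PIN form the initial block), then parse each block's fields into a dict and keep the non-empty ones.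
import Mathlib
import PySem

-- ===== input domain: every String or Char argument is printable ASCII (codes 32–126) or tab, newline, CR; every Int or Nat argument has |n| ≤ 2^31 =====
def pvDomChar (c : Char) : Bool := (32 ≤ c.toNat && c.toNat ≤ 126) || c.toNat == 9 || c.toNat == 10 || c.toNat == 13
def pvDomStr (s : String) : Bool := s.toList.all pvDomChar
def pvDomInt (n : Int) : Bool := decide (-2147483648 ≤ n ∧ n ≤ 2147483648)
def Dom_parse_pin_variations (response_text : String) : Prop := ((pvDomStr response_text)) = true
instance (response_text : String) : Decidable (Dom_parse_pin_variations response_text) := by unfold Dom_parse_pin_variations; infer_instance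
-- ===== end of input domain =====

-- B replaces A's single-pass state machine by a segment-then-parse pipeline (same cost, different decomposition).

-- ===== PORT A =====
-- one iteration of A's loop: state = (variations, current_pin)
def pvStepA (st : List (PySem.Dict String String) × PySem.Dict String String) (line0 : String) :
    List (PySem.Dict String String) × PySem.Dict String String :=
  let line := PySem.Str.strip line0
  if PySem.Str.startswith line "PIN " then
    ((if st.2.items = [] then st.1 else st.1 ++ [st.2]), PySem.Dict.empty)
  else if PySem.Str.startswith line "Description:" then
    (st.1, st.2.insert "description" (PySem.Str.strip (PySem.Str.replace line "Description:" "")))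
  else if PySem.Str.startswith line "Hook:" then
    (st.1, st.2.insert "hook" (PySem.Str.strip (PySem.Str.replace line "Hook:" "")))
  else if PySem.Str.startswith line "Hashtags:" then
    (st.1, st.2.insert "hashtags" (PySem.Str.strip (PySem.Str.replace line "Hashtags:" "")))
  else st

def parse_pin_variations (response_text : String) : List (List (String × String)) :=
  -- split? is always `some` here (separator "\n" ≠ ""): .getD [] only makes it total
  let lines := (PySem.Str.split? (PySem.Str.strip response_text) "\n").getD []
  let st := lines.foldl pvStepA ([], PySem.Dict.empty)
  -- add last pin
  (if st.2.items = [] then st.1 else st.1 ++ [st.2]).map (fun d => d.items)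

-- ===== PORT B =====
-- B's per-block field parse (the elif chain over a block's lines)
def pvFieldB (d : PySem.Dict String String) (line : String) : PySem.Dict String String :=
  if PySem.Str.startswith line "Description:" then
    d.insert "description" (PySem.Str.strip (PySem.Str.replace line "Description:" ""))
  else if PySem.Str.startswith line "Hook:" then
    d.insert "hook" (PySem.Str.strip (PySem.Str.replace line "Hook:" ""))
  else if PySem.Str.startswith line "Hashtags:" then
    d.insert "hashtags" (PySem.Str.strip (PySem.Str.replace line "Hashtags:" ""))
  else d

def pvParseBlock (block : List String) : PySem.Dict String String :=
  block.foldl pvFieldB PySem.Dict.empty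

-- B's segmentation loop: state = (blocks, current)
def pvBlockStep (st : List (List String) × List String) (line : String) :
    List (List String) × List String :=
  if PySem.Str.startswith line "PIN " then (st.1 ++ [st.2], [])
  else (st.1, st.2 ++ [line])

-- B's collection loop over the blocks (general in the start accumulator; Source B starts from [])
def pvCollect (acc : List (List (String × String))) (bs : List (List String)) :
    List (List (String × String)) :=
  bs.foldl (fun acc b => let p := pvParseBlock b; if p.items = [] then acc else acc ++ [p.items]) acc

def parse_pin_variations_alt (response_text : String) : List (List (String × String)) :=
  -- split? is always `some` here (separator "\n" ≠ ""): .getD [] only makes it total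
  let lines := ((PySem.Str.split? (PySem.Str.strip response_text) "\n").getD []).map PySem.Str.strip
  let st := lines.foldl pvBlockStep ([], [])
  pvCollect [] (st.1 ++ [st.2])

-- ===== PRECONDITION & SPEC =====
def Spec_parse_pin_variations (response_text : String) (out : List (List (String × String))) : Prop := out = parse_pin_variations_alt response_text
instance (response_text : String) (out : List (List (String × String))) : Decidable (Spec_parse_pin_variations response_text out) := by unfold Spec_parse_pin_variations; infer_instance

-- ===== CLAIM (what is proved, stated in full; the proofs are below) =====
def Claim_equal_parse_pin_variations : Prop := ∀ (response_text : String), Dom_parse_pin_variations response_text → Spec_parse_pin_variations response_text (parse_pin_variations response_text)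

-- ===== LEMMAS AND PROOFS =====

-- canonical form of the result as a function of the remaining (raw) lines and the current pin dict
def pvG (cur : PySem.Dict String String) : List String → List (PySem.Dict String String)
  | [] => if cur.items = [] then [] else [cur]
  | line0 :: rest =>
    let line := PySem.Str.strip line0
    if PySem.Str.startswith line "PIN " then
      (if cur.items = [] then [] else [cur]) ++ pvG PySem.Dict.empty rest
    else pvG (pvFieldB cur line) rest

-- A's fold, flushed at the end, computes pvG
set_option maxHeartbeats 2000000 in
theorem pvA_eq_pvG (l : List String) (vars : List (PySem.Dict String String))
    (cur : PySem.Dict String String) :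
    (if (l.foldl pvStepA (vars, cur)).2.items = [] then (l.foldl pvStepA (vars, cur)).1
     else (l.foldl pvStepA (vars, cur)).1 ++ [(l.foldl pvStepA (vars, cur)).2])
    = vars ++ pvG cur l := by
  induction l generalizing vars cur with
  | nil =>
    simp only [List.foldl_nil, pvG]
    by_cases h : cur.items = []
    · rw [if_pos h, if_pos h, List.append_nil]
    · rw [if_neg h, if_neg h]
  | cons line0 rest ih =>
    simp only [List.foldl_cons, pvG]
    by_cases hp : PySem.Str.startswith (PySem.Str.strip line0) "PIN " = true
    · have hstep : pvStepA (vars, cur) line0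
          = ((if cur.items = [] then vars else vars ++ [cur]), PySem.Dict.empty) := by
        simp only [pvStepA]; rw [if_pos hp]
      rw [hstep, ih, if_pos hp]
      by_cases h : cur.items = []
      · rw [if_pos h, if_pos h, List.nil_append]
      · rw [if_neg h, if_neg h, List.append_assoc]
    · have hstep : pvStepA (vars, cur) line0 = (vars, pvFieldB cur (PySem.Str.strip line0)) := by
        simp only [pvStepA, pvFieldB]
        rw [if_neg hp]
        by_cases h1 : PySem.Str.startswith (PySem.Str.strip line0) "Description:" = true
        · rw [if_pos h1, if_pos h1]
        · rw [if_neg h1, if_neg h1]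
          by_cases h2 : PySem.Str.startswith (PySem.Str.strip line0) "Hook:" = true
          · rw [if_pos h2, if_pos h2]
          · rw [if_neg h2, if_neg h2]
            by_cases h3 : PySem.Str.startswith (PySem.Str.strip line0) "Hashtags:" = true
            · rw [if_pos h3, if_pos h3]
            · rw [if_neg h3, if_neg h3]
      rw [hstep, ih, if_neg hp]

theorem pvCollect_append (acc : List (List (String × String))) (xs ys : List (List String)) :
    pvCollect acc (xs ++ ys) = pvCollect (pvCollect acc xs) ys := by
  simp only [pvCollect, List.foldl_append]

theorem pvCollect_single (acc : List (List (String × String))) (b : List String) :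
    pvCollect acc [b]
    = acc ++ (if (pvParseBlock b).items = [] then [] else [(pvParseBlock b).items]) := by
  simp only [pvCollect, List.foldl_cons, List.foldl_nil]
  by_cases h : (pvParseBlock b).items = []
  · rw [if_pos h, if_pos h, List.append_nil]
  · rw [if_neg h, if_neg h]

theorem pvParseBlock_snoc (b : List String) (x : String) :
    pvParseBlock (b ++ [x]) = pvFieldB (pvParseBlock b) x := by
  simp only [pvParseBlock, List.foldl_append, List.foldl_cons, List.foldl_nil]

-- B's segmentation-then-parse computes pvG too
set_option maxHeartbeats 2000000 in
theorem pvB_eq_pvG (l : List String) (done : List (List String))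
    (acc : List (List (String × String))) (cb : List String) :
    pvCollect acc (((l.map PySem.Str.strip).foldl pvBlockStep (done, cb)).1
      ++ [((l.map PySem.Str.strip).foldl pvBlockStep (done, cb)).2])
    = pvCollect acc done ++ (pvG (pvParseBlock cb) l).map (fun d => d.items) := by
  induction l generalizing done acc cb with
  | nil =>
    simp only [List.map_nil, List.foldl_nil, pvG]
    rw [pvCollect_append, pvCollect_single]
    by_cases h : (pvParseBlock cb).items = []
    · rw [if_pos h, if_pos h]; rfl
    · rw [if_neg h, if_neg h]; rfl
  | cons line0 rest ih =>
    simp only [List.map_cons, List.foldl_cons, pvG]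
    by_cases hp : PySem.Str.startswith (PySem.Str.strip line0) "PIN " = true
    · have hstep : pvBlockStep (done, cb) (PySem.Str.strip line0) = (done ++ [cb], []) := by
        simp only [pvBlockStep]; rw [if_pos hp]
      rw [hstep, ih, if_pos hp, pvCollect_append, pvCollect_single,
        show pvParseBlock ([] : List String) = PySem.Dict.empty from rfl, List.map_append]
      by_cases h : (pvParseBlock cb).items = []
      · rw [if_pos h, if_pos h]
        simp only [List.append_nil, List.map_nil, List.nil_append]
      · rw [if_neg h, if_neg h]
        simp only [List.map_cons, List.map_nil, List.append_assoc]
    · have hstep : pvBlockStep (done, cb) (PySem.Str.strip line0)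
          = (done, cb ++ [PySem.Str.strip line0]) := by
        simp only [pvBlockStep]; rw [if_neg hp]
      rw [hstep, ih, pvParseBlock_snoc, if_neg hp]

-- ===== VERDICT (by name: the statement is the Claim_ definition above) =====
set_option maxHeartbeats 1000000 in
theorem parse_pin_variations_spec : Claim_equal_parse_pin_variations := by
  intro t _
  unfold Spec_parse_pin_variations
  have hA := pvA_eq_pvG ((PySem.Str.split? (PySem.Str.strip t) "\n").getD []) [] PySem.Dict.empty
  have hB := pvB_eq_pvG ((PySem.Str.split? (PySem.Str.strip t) "\n").getD []) [] [] []
  unfold parse_pin_variations parse_pin_variations_alt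
  simp only []
  rw [hA, hB]
  simp [pvCollect, pvParseBlock]
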